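-- pv_equiv track=rewrite | github.com/Insert-Generic-Name-Here/lonelyboy | lonelyboy/lbmultimedia.py | has_n_neighbor
-- ===== SOURCE A (Python) =====
-- def has_n_neighbor(point, lst, num=1):
--     ''' Return True if point has atleast #num of neighbors in list lst (other than itself)'''
--     neighs = []
--     for cand in lst:
--         if abs(cand[0]-point[0])<=1 and abs(cand[1]-point[1])<=1 and point != cand:
--             neighs.append(cand)
--
--     if len(neighs)>=num:
--         return True
--     else:
--         return False
-- ===== SOURCE B (Python) =====
-- def has_n_neighbor(point, lst, num=1):
--     ''' Return True if point has atleast #num of neighbors in list lst (other than itself)'''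
--     counts = {}
--     for p in lst:
--         counts[p] = counts.get(p, 0) + 1
--     px, py = point
--     total = 0
--     for dx in (-1, 0, 1):
--         for dy in (-1, 0, 1):
--             if (dx, dy) != (0, 0):
--                 total += counts.get((px + dx, py + dy), 0)
--     return total >= num
-- ===== Notes on version B (the rewrite author's own statement) =====
-- stated objective: alternative
-- what changed: Instead of scanning lst with a per-element Chebyshev-distance test, B builds a dict counting occurrences of each coordinate once and then sums the counts at the 8 fixed neighbor cells around point.
import Mathlib
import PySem

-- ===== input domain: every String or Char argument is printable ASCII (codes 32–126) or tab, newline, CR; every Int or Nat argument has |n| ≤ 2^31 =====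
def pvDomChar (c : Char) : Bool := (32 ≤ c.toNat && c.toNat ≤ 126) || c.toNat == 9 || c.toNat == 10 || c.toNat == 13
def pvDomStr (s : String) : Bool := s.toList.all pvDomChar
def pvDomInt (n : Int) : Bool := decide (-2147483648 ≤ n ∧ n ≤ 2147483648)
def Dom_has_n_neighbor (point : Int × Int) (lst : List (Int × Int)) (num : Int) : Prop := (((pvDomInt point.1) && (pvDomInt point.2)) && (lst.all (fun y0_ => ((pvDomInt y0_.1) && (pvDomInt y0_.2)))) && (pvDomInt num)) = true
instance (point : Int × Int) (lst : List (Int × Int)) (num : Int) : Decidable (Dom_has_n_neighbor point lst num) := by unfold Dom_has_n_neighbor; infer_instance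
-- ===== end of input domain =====

-- B replaces A's whole-list distance scan by a coordinate-count dict probed at the 8 neighbor cells (alternative algorithm, same cost).

-- ===== PORT A =====
def has_n_neighbor (point : Int × Int) (lst : List (Int × Int)) (num : Int) : Bool :=
  let neighs := lst.foldl (fun ns cand =>
    if |cand.1 - point.1| ≤ 1 ∧ |cand.2 - point.2| ≤ 1 ∧ point ≠ cand then ns ++ [cand] else ns) []
  decide (num ≤ (neighs.length : Int))

-- ===== PORT B =====
def has_n_neighbor_alt (point : Int × Int) (lst : List (Int × Int)) (num : Int) : Bool :=
  let counts : PySem.Dict (Int × Int) Int :=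
    lst.foldl (fun d p => d.insert p (d.getD p 0 + 1)) PySem.Dict.empty
  let total := ([-1, 0, 1] : List Int).foldl (fun t dx =>
    ([-1, 0, 1] : List Int).foldl (fun t dy =>
      if (dx, dy) ≠ ((0 : Int), (0 : Int)) then
        t + counts.getD (point.1 + dx, point.2 + dy) 0
      else t) t) 0
  decide (total ≥ num)

-- ===== PRECONDITION & SPEC =====
def Spec_has_n_neighbor (point : Int × Int) (lst : List (Int × Int)) (num : Int) (out : Bool) : Prop := out = has_n_neighbor_alt point lst num
instance (point : Int × Int) (lst : List (Int × Int)) (num : Int) (out : Bool) : Decidable (Spec_has_n_neighbor point lst num out) := by unfold Spec_has_n_neighbor; infer_instance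

-- ===== CLAIM (what is proved, stated in full; the proofs are below) =====
def Claim_equal_has_n_neighbor : Prop := ∀ (point : Int × Int) (lst : List (Int × Int)) (num : Int), Dom_has_n_neighbor point lst num → Spec_has_n_neighbor point lst num (has_n_neighbor point lst num)

-- ===== LEMMAS AND PROOFS =====

-- 0/1 indicator of |a - p| <= 1 splits into the three exact positions
theorem pv_one_dim (p a : Int) :
    (if |a - p| ≤ 1 then (1 : Int) else 0) =
      (if a = p - 1 then (1 : Int) else 0) + (if a = p then (1 : Int) else 0) +
        (if a = p + 1 then (1 : Int) else 0) := by
  simp only [abs_le]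
  split_ifs <;> omega

-- a pair-equality indicator is the product of the coordinate indicators
theorem pv_pair_if (a1 a2 c1 c2 : Int) :
    (if (a1, a2) = (c1, c2) then (1 : Int) else 0) =
      (if a1 = c1 then (1 : Int) else 0) * (if a2 = c2 then (1 : Int) else 0) := by
  simp only [Prod.mk.injEq]
  split_ifs <;> first | rfl | omega

-- the neighbor indicator is the Chebyshev box indicator minus the center indicator
theorem pv_lhs_split (p1 p2 a1 a2 : Int) :
    (if |a1 - p1| ≤ 1 ∧ |a2 - p2| ≤ 1 ∧ (p1, p2) ≠ (a1, a2) then (1 : Int) else 0) =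
      (if |a1 - p1| ≤ 1 then (1 : Int) else 0) * (if |a2 - p2| ≤ 1 then (1 : Int) else 0) -
        (if a1 = p1 then (1 : Int) else 0) * (if a2 = p2 then (1 : Int) else 0) := by
  simp only [abs_le, ne_eq, Prod.mk.injEq, not_and]
  split_ifs <;> omega

-- one element's contribution: it is a neighbor iff it equals point shifted by one of the 8 offsets
theorem pv_elem (point a : Int × Int) :
    (if |a.1 - point.1| ≤ 1 ∧ |a.2 - point.2| ≤ 1 ∧ point ≠ a then (1 : Int) else 0) =
      (if a = (point.1 - 1, point.2 - 1) then (1 : Int) else 0) +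
      (if a = (point.1 - 1, point.2) then (1 : Int) else 0) +
      (if a = (point.1 - 1, point.2 + 1) then (1 : Int) else 0) +
      (if a = (point.1, point.2 - 1) then (1 : Int) else 0) +
      (if a = (point.1, point.2 + 1) then (1 : Int) else 0) +
      (if a = (point.1 + 1, point.2 - 1) then (1 : Int) else 0) +
      (if a = (point.1 + 1, point.2) then (1 : Int) else 0) +
      (if a = (point.1 + 1, point.2 + 1) then (1 : Int) else 0) := by
  obtain ⟨a1, a2⟩ := a
  obtain ⟨p1, p2⟩ := point
  have hne : ((p1, p2) ≠ (a1, a2)) ↔ ¬(a1 = p1 ∧ a2 = p2) := by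
    constructor <;> (intro h h2; apply h; simp only [Prod.mk.injEq] at *; omega)
  rw [show (if |a1 - p1| ≤ 1 ∧ |a2 - p2| ≤ 1 ∧ (p1, p2) ≠ (a1, a2) then (1 : Int) else 0) =
      (if |a1 - p1| ≤ 1 then (1 : Int) else 0) * (if |a2 - p2| ≤ 1 then (1 : Int) else 0) -
        (if a1 = p1 then (1 : Int) else 0) * (if a2 = p2 then (1 : Int) else 0) from
      pv_lhs_split p1 p2 a1 a2,
    pv_one_dim p1 a1, pv_one_dim p2 a2]
  simp only [pv_pair_if]
  ring

-- counting neighbors by filtering equals summing the multiplicities of the 8 neighbor cells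
theorem pv_count (point : Int × Int) (lst : List (Int × Int)) :
    (lst.countP (fun cand =>
        decide (|cand.1 - point.1| ≤ 1) &&
          (decide (|cand.2 - point.2| ≤ 1) && !decide (point = cand))) : Int) =
      (lst.count (point.1 - 1, point.2 - 1) : Int) +
      (lst.count (point.1 - 1, point.2) : Int) +
      (lst.count (point.1 - 1, point.2 + 1) : Int) +
      (lst.count (point.1, point.2 - 1) : Int) +
      (lst.count (point.1, point.2 + 1) : Int) +
      (lst.count (point.1 + 1, point.2 - 1) : Int) +
      (lst.count (point.1 + 1, point.2) : Int) +
      (lst.count (point.1 + 1, point.2 + 1) : Int) := by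
  induction lst with
  | nil => simp
  | cons a tl ih =>
    have h := pv_elem point a
    simp only [ne_eq] at h
    simp only [List.countP_cons, List.count_cons, beq_iff_eq, Bool.and_eq_true,
      Bool.not_eq_true', decide_eq_true_eq, decide_eq_false_iff_not]
    push_cast
    omega

-- ===== VERDICT (by name: the statement is the Claim_ definition above) =====
theorem has_n_neighbor_spec : Claim_equal_has_n_neighbor := by
  intro point lst num _
  unfold Spec_has_n_neighbor has_n_neighbor has_n_neighbor_alt
  rw [PySem.List.foldl_append_ite_eq_filter]
  have hc := pv_count point lst
  rw [List.countP_eq_length_filter] at hc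
  simp only [List.nil_append, List.foldl_cons, List.foldl_nil,
    PySem.Dict.getD_foldl_insert_add_one, PySem.Dict.getD_empty]
  norm_num
  have e1 : point.1 + -1 = point.1 - 1 := by ring
  have e2 : point.2 + -1 = point.2 - 1 := by ring
  simp only [e1, e2]
  omega
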